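-- pv_equiv track=rewrite | github.com/Lilili2214/Data-Struture-and-Algorithms- | Rabin-Karp Algorithms/Multiple_search.py | rabin_karp_algorithm_multiple_2
-- ===== SOURCE A (Python) =====
-- def polynomial_hash(s):
-- 	hash_value = 0
-- 	for i in range(len(s)):
-- 		hash_value += (ord(s[i])*(26**(len(s) - i - 1)))
-- 	return hash_value
--
-- def polynomial_rolling_hash(previous_hash, c1, c2, pattern_length):
-- 	return (previous_hash - ord(c1) * (26**(pattern_length - 1))) * 26 + ord(c2)
--
-- def rabin_karp_algorithm_multiple_2(patterns, text):
--
--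
--     p = len(patterns[0])
--     t = len(text)
--     b = 26
--
--
--     pattern_hashes = [polynomial_hash(pattern) for pattern in patterns]
--     text_hash = polynomial_hash(text[:p])
--
--     occurrences = [0] * len(patterns)
--
--     for i in range(t - p + 1):
--         if i > 0:
--             text_hash = polynomial_rolling_hash(text_hash, text[i - 1], text[i + p - 1], p)
--
--         for j, pattern_hash in enumerate(pattern_hashes):
--             if pattern_hash == text_hash:
--                 occurrences[j] += 1
--
--     return occurrences
-- ===== SOURCE B (Python) =====
-- def _horner_hash(s):
--     h = 0
--     for ch in s:
--         h = h * 26 + ord(ch)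
--     return h
--
-- def rabin_karp_algorithm_multiple_2(patterns, text):
--     p = len(patterns[0])
--     t = len(text)
--     shift = 26 ** (p - 1) if p > 0 else 0
--     counts = {}
--     h = _horner_hash(text[:p])
--     for i in range(t - p + 1):
--         if i > 0:
--             h = (h - ord(text[i - 1]) * shift) * 26 + ord(text[i + p - 1])
--         counts[h] = counts.get(h, 0) + 1
--     return [counts.get(_horner_hash(pat), 0) for pat in patterns]
-- ===== Notes on version B (the rewrite author's own statement) =====
-- stated objective: faster
-- what changed: A rescans the whole list of pattern hashes for every text window; B builds a counter of window hashes in one rolling pass (Horner hashing instead of per-character powers) and then answers each pattern with a single dictionary lookup.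
-- outside the precondition, e.g. on rabin_karp_algorithm_multiple_2([''], 'ab'): A returns [2], B returns [1]
import Mathlib
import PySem

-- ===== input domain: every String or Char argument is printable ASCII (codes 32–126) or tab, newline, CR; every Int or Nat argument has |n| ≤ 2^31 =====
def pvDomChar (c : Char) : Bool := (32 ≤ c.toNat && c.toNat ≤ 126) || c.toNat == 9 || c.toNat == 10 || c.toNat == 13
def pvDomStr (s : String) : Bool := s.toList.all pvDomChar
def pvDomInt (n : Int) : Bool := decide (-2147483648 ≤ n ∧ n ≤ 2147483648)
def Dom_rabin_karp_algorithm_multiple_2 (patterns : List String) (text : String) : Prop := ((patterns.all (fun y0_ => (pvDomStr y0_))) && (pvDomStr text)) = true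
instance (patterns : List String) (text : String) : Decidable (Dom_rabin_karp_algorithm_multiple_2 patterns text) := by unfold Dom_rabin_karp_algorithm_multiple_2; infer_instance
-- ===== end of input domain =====

-- B replaces A's per-window scan of all pattern hashes by a counter of window hashes built
-- in one pass, followed by one lookup per pattern (objective: faster, O(t*k) → O(t+k)).

-- ===== PORT A =====
-- polynomial_hash: sum of ord(s[i]) * 26^(len-i-1) over an index loop
def pvPolyHash (cs : List Char) : Int :=
  (PySem.List.pyRange 0 (PySem.List.len cs) 1).foldl
    (fun h i =>
      h + ((PySem.List.pyGetD cs i ' ').toNat : Int) * 26 ^ ((PySem.List.len cs) - i - 1).toNat)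
    0

-- polynomial_rolling_hash (exponent pattern_length-1 taken in Nat; Pre_ keeps pattern_length ≥ 1 whenever it is used)
def pvRollHash (prev : Int) (c1 c2 : Char) (plen : Int) : Int :=
  (prev - (c1.toNat : Int) * 26 ^ (plen - 1).toNat) * 26 + (c2.toNat : Int)

def rabin_karp_algorithm_multiple_2 (patterns : List String) (text : String) : List Int :=
  let tl := text.toList
  let p : Int := PySem.Str.len (patterns.headD "")   -- patterns[0]: IndexError on [] is excluded by Pre_
  let t : Int := PySem.Str.len text
  let patternHashes := patterns.map (fun pat => pvPolyHash pat.toList)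
  let textHash := pvPolyHash (PySem.List.slice tl none (some p))
  let occ0 : List Int := List.replicate patterns.length 0
  let res := (PySem.List.pyRange 0 (t - p + 1) 1).foldl
    (fun (st : Int × List Int) i =>
      let th := if i > 0 then
          pvRollHash st.1 (PySem.List.pyGetD tl (i-1) ' ') (PySem.List.pyGetD tl (i+p-1) ' ') p
        else st.1
      let occ := (PySem.List.enumerate patternHashes 0).foldl
        (fun o jp => if jp.2 = th then PySem.List.pySetD o jp.1 (PySem.List.pyGetD o jp.1 0 + 1) else o)
        st.2
      (th, occ))
    (textHash, occ0)
  res.2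

-- ===== PORT B =====
-- _horner_hash: Horner evaluation, one multiply-add per character
def pvHorner (cs : List Char) : Int := cs.foldl (fun h c => h * 26 + (c.toNat : Int)) 0

def rabin_karp_algorithm_multiple_2_alt (patterns : List String) (text : String) : List Int :=
  let tl := text.toList
  let p : Int := PySem.Str.len (patterns.headD "")
  let t : Int := PySem.Str.len text
  let shift : Int := 26 ^ (p - 1).toNat
  let res := (PySem.List.pyRange 0 (t - p + 1) 1).foldl
    (fun (st : Int × PySem.Dict Int Int) i =>
      let h := if i > 0 then
          (st.1 - ((PySem.List.pyGetD tl (i-1) ' ').toNat : Int) * shift) * 26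
            + ((PySem.List.pyGetD tl (i+p-1) ' ').toNat : Int)
        else st.1
      (h, st.2.modify h 0 (· + 1)))
    (pvHorner (PySem.List.slice tl none (some p)), PySem.Dict.empty)
  patterns.map (fun pat => res.2.getD (pvHorner pat.toList) 0)

-- ===== PRECONDITION & SPEC =====
-- Pre_ excludes patterns = [] (A raises IndexError on patterns[0]) and an empty first pattern with
-- nonempty text, where Python's 26**(p-1) is a float and A's result depends on float rounding.
def Pre_rabin_karp_algorithm_multiple_2 (patterns : List String) (text : String) : Prop :=
  patterns ≠ [] ∧ (0 < PySem.Str.len (patterns.headD "") ∨ text = "")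
instance (patterns : List String) (text : String) : Decidable (Pre_rabin_karp_algorithm_multiple_2 patterns text) := by unfold Pre_rabin_karp_algorithm_multiple_2; infer_instance
def pvWitness_rabin_karp_algorithm_multiple_2 : List String × String := (["ab", "ba"], "abab")

def Spec_rabin_karp_algorithm_multiple_2 (patterns : List String) (text : String) (out : List Int) : Prop := out = rabin_karp_algorithm_multiple_2_alt patterns text
instance (patterns : List String) (text : String) (out : List Int) : Decidable (Spec_rabin_karp_algorithm_multiple_2 patterns text out) := by unfold Spec_rabin_karp_algorithm_multiple_2; infer_instance

-- ===== CLAIM (what is proved, stated in full; the proofs are below) =====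
def Claim_equal_rabin_karp_algorithm_multiple_2 : Prop := ∀ (patterns : List String) (text : String), Dom_rabin_karp_algorithm_multiple_2 patterns text → Pre_rabin_karp_algorithm_multiple_2 patterns text → Spec_rabin_karp_algorithm_multiple_2 patterns text (rabin_karp_algorithm_multiple_2 patterns text)

-- ===== LEMMAS AND PROOFS =====

-- A's power-sum hash equals B's Horner hash.
theorem pvPolyHash_eq_horner (cs : List Char) : pvPolyHash cs = pvHorner cs := by
  induction cs using List.reverseRecOn with
  | nil => rfl
  | append_singleton cs c ih =>
    have hn : (0 : Int) ≤ (cs.length : Int) := by positivity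
    unfold pvPolyHash pvHorner at *
    simp only [PySem.List.len_eq, List.length_append, List.length_singleton, List.foldl_append,
      List.foldl_cons, List.foldl_nil]
    rw [show ((cs.length + 1 : Nat) : Int) = (cs.length : Int) + 1 by push_cast; ring,
      PySem.List.pyRange_one_succ_right hn]
    rw [List.foldl_append]
    simp only [List.foldl_cons, List.foldl_nil]
    rw [PySem.List.foldl_add] at *
    have hlast : ((PySem.List.pyGetD (cs ++ [c]) (cs.length : Int) ' ').toNat : Int)
        * 26 ^ (((cs.length : Int) + 1) - (cs.length : Int) - 1).toNat = (c.toNat : Int) := by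
      simp [PySem.List.pyGetD_natCast]
    have hmap : (PySem.List.pyRange 0 (cs.length : Int) 1).map
        (fun i => ((PySem.List.pyGetD (cs ++ [c]) i ' ').toNat : Int) * 26 ^ (((cs.length : Int) + 1) - i - 1).toNat)
      = (PySem.List.pyRange 0 (cs.length : Int) 1).map
        (fun i => 26 * (((PySem.List.pyGetD cs i ' ').toNat : Int) * 26 ^ ((cs.length : Int) - i - 1).toNat)) := by
      refine List.map_congr_left ?_
      intro i hi
      rw [PySem.List.mem_pyRange_one] at hi
      obtain ⟨hi0, hin⟩ := hi
      have hgetEq : PySem.List.pyGetD (cs ++ [c]) i ' ' = PySem.List.pyGetD cs i ' ' := by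
        rw [PySem.List.pyGetD_of_nonneg _ _ hi0, PySem.List.pyGetD_of_nonneg _ _ hi0,
          List.getD_append _ _ _ _ (by omega)]
      have hexp : (((cs.length : Int) + 1) - i - 1).toNat = ((cs.length : Int) - i - 1).toNat + 1 := by
        omega
      rw [hgetEq, hexp, pow_succ]
      ring
    rw [hlast, hmap, List.sum_map_mul_left]
    simp only [PySem.List.len_eq] at ih
    linear_combination 26 * ih

-- A's inner enumerate-and-bump loop, on a list that is `pre ++ phs.map f`, bumps exactly the
-- positions whose pattern hash equals the window hash.
theorem pv_inner (th : Int) :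
    ∀ (phs pre : List Int) (f : Int → Int),
    (PySem.List.enumerate phs (pre.length : Int)).foldl
      (fun o jp => if jp.2 = th then PySem.List.pySetD o jp.1 (PySem.List.pyGetD o jp.1 0 + 1) else o)
      (pre ++ phs.map f)
    = pre ++ phs.map (fun ph => if ph = th then f ph + 1 else f ph) := by
  intro phs
  induction phs with
  | nil => intro pre f; simp [PySem.List.enumerate_nil]
  | cons ph rest ih =>
    intro pre f
    rw [PySem.List.enumerate_cons]
    simp only [List.foldl_cons, List.map_cons]
    have hstep : (if ((pre.length : Int), ph).2 = th then
          PySem.List.pySetD (pre ++ f ph :: rest.map f) ((pre.length : Int), ph).1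
            (PySem.List.pyGetD (pre ++ f ph :: rest.map f) ((pre.length : Int), ph).1 0 + 1)
        else (pre ++ f ph :: rest.map f))
        = (pre ++ [if ph = th then f ph + 1 else f ph]) ++ rest.map f := by
      by_cases hph : ph = th
      · simp [hph]
      · simp [hph]
    rw [hstep]
    have hlen : (pre.length : Int) + 1 = (((pre ++ [if ph = th then f ph + 1 else f ph]).length : Nat) : Int) := by
      simp
    rw [hlen, ih]
    simp

theorem pv_outer (g : Int → Int → Int) (phs : List Int) :
    ∀ (l : List Int) (h0 : Int) (d : PySem.Dict Int Int),
    (l.foldl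
      (fun (st : Int × List Int) i =>
        let th := g st.1 i
        (th, (PySem.List.enumerate phs 0).foldl
          (fun o jp => if jp.2 = th then PySem.List.pySetD o jp.1 (PySem.List.pyGetD o jp.1 0 + 1) else o)
          st.2))
      (h0, phs.map (fun ph => d.getD ph 0))).2
    = phs.map (fun ph =>
        (l.foldl (fun (st : Int × PySem.Dict Int Int) i =>
            let h := g st.1 i
            (h, st.2.modify h 0 (· + 1))) (h0, d)).2.getD ph 0) := by
  intro l
  induction l with
  | nil => intro h0 d; rfl
  | cons i l ih =>
    intro h0 d
    simp only [List.foldl_cons]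
    have h0eq : (0 : Int) = ((([] : List Int).length : Nat) : Int) := by simp
    have hin : (PySem.List.enumerate phs 0).foldl
        (fun o jp => if jp.2 = g h0 i then PySem.List.pySetD o jp.1 (PySem.List.pyGetD o jp.1 0 + 1) else o)
        (phs.map (fun ph => d.getD ph 0))
      = phs.map (fun ph => (d.modify (g h0 i) 0 (· + 1)).getD ph 0) := by
      have := pv_inner (g h0 i) phs [] (fun ph => d.getD ph 0)
      simp only [List.length_nil, Nat.cast_zero, List.nil_append] at this
      rw [this]
      refine List.map_congr_left ?_
      intro ph _
      rw [PySem.Dict.getD_modify]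
      by_cases hph : ph = g h0 i <;> simp [hph]
    simp only [hin]
    exact ih (g h0 i) (d.modify (g h0 i) 0 (· + 1))

-- ===== VERDICT (by name: the statement is the Claim_ definition above) =====
theorem rabin_karp_algorithm_multiple_2_spec : Claim_equal_rabin_karp_algorithm_multiple_2 := by
  intro patterns text _ _
  unfold Spec_rabin_karp_algorithm_multiple_2
  unfold rabin_karp_algorithm_multiple_2 rabin_karp_algorithm_multiple_2_alt
  dsimp only
  simp only [pvPolyHash_eq_horner]
  have hocc : List.replicate patterns.length (0 : Int)
      = (patterns.map (fun pat => pvHorner pat.toList)).map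
          (fun ph => (PySem.Dict.empty : PySem.Dict Int Int).getD ph 0) := by
    simp [PySem.Dict.getD_empty, Function.comp_def, List.map_const']
  rw [hocc]
  have H := pv_outer
    (fun prev i => if i > 0 then
        pvRollHash prev (PySem.List.pyGetD text.toList (i-1) ' ')
          (PySem.List.pyGetD text.toList (i + PySem.Str.len (patterns.headD "") - 1) ' ')
          (PySem.Str.len (patterns.headD ""))
      else prev)
    (patterns.map (fun pat => pvHorner pat.toList))
    (PySem.List.pyRange 0 (PySem.Str.len text - PySem.Str.len (patterns.headD "") + 1) 1)
    (pvHorner (PySem.List.slice text.toList none (some (PySem.Str.len (patterns.headD "")))))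
    PySem.Dict.empty
  rw [H, List.map_map]
  rfl
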